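-- pv_equiv track=rewrite | github.com/MrBrantCode/unitest_baseline | mut_generate/mist_train_cf/cf_64104/solution.py | polynomial_occur
-- ===== SOURCE A (Python) =====
-- import math
-- from collections import Counter
--
-- def polynomial_occur(arr):
--     # frequency dictionary
--     frequency = Counter(arr)
--
--     def isPerfectSquare(x):
--         return x == math.isqrt(x) ** 2
--
--     def isPowerOfTwo(n):
--         return (n and (not(n & (n - 1))))
--
--     # list to store numbers with polynomial frequency
--     polynomial_frequency = []
--
--     for num, freq in frequency.items():
--         # if freq is perfect square or power of 2, append num to list
--         if isPerfectSquare(freq) or isPowerOfTwo(freq):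
--             polynomial_frequency.append(num)
--
--     # if list is not empty, return smallest number. Else, return -1
--     if polynomial_frequency:
--         return min(polynomial_frequency)
--     else:
--         return -1
-- ===== SOURCE B (Python) =====
-- import math
--
-- def polynomial_occur(arr):
--     def isPerfectSquare(x):
--         return x == math.isqrt(x) ** 2
--
--     def isPowerOfTwo(n):
--         return (n and (not(n & (n - 1))))
--
--     # sort ascending, then run-length scan: the first run whose length
--     # qualifies gives the smallest qualifying value
--     cur = 0
--     cnt = 0
--     for v in sorted(arr):
--         if cnt > 0 and v == cur:
--             cnt += 1
--         else:
--             if cnt > 0 and (isPerfectSquare(cnt) or isPowerOfTwo(cnt)):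
--                 return cur
--             cur = v
--             cnt = 1
--     if cnt > 0 and (isPerfectSquare(cnt) or isPowerOfTwo(cnt)):
--         return cur
--     return -1
-- ===== Notes on version B (the rewrite author's own statement) =====
-- stated objective: alternative
-- what changed: Replaced A's Counter + qualifying-keys list + min() with a sort of the array followed by a single run-length scan that returns the first run (hence smallest value) whose length is a perfect square or a power of two.
import Mathlib
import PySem

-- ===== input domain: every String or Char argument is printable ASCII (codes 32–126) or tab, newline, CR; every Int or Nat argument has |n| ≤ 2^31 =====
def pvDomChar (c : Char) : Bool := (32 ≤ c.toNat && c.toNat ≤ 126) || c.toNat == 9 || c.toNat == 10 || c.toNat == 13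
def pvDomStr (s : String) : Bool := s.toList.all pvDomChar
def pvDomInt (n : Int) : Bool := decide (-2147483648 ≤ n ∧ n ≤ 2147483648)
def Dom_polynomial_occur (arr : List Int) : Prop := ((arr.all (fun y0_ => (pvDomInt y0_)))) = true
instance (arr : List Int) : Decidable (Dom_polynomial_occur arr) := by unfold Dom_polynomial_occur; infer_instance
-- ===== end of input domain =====

-- B replaces A's Counter + filter + min() by sort-then-run-length scan returning the
-- first qualifying run's value (objective: alternative decomposition, same cost class).

-- ===== PORT A =====
-- math.isqrt(x) is Nat.sqrt x.toNat, exact for x ≥ 0; here x is always a Counter count, hence ≥ 1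
def pvIsPerfectSquareA (x : Int) : Bool := x == ((Nat.sqrt x.toNat : Int)) ^ 2

-- Python's `n and (not (n & (n - 1)))` is used only for its truthiness
def pvIsPowerOfTwoA (n : Int) : Bool := n != 0 && (PySem.Int.band n (n - 1) == 0)

def polynomial_occur (arr : List Int) : Int :=
  let frequency := PySem.Dict.counter arr
  let polynomial_frequency : List Int :=
    frequency.items.foldl
      (fun acc p => if pvIsPerfectSquareA p.2 || pvIsPowerOfTwoA p.2 then acc ++ [p.1] else acc) []
  match PySem.List.min? polynomial_frequency (fun x => x) with
  | some m => m
  | none => -1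

-- ===== PORT B =====
def pvIsPerfectSquareB (x : Int) : Bool := x == ((Nat.sqrt x.toNat : Int)) ^ 2

def pvIsPowerOfTwoB (n : Int) : Bool := n != 0 && (PySem.Int.band n (n - 1) == 0)

-- the for-loop of Source B with its early return; state = (cur, cnt)
def pvScanB (cur : Int) (cnt : Int) : List Int → Int
  | [] => if cnt > 0 && (pvIsPerfectSquareB cnt || pvIsPowerOfTwoB cnt) then cur else -1
  | v :: rest =>
    if cnt > 0 && v == cur then pvScanB cur (cnt + 1) rest
    else if cnt > 0 && (pvIsPerfectSquareB cnt || pvIsPowerOfTwoB cnt) then cur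
    else pvScanB v 1 rest

def polynomial_occur_alt (arr : List Int) : Int :=
  pvScanB 0 0 (PySem.List.sorted arr (fun x => x) false)

-- ===== PRECONDITION & SPEC =====
def Spec_polynomial_occur (arr : List Int) (out : Int) : Prop := out = polynomial_occur_alt arr
instance (arr : List Int) (out : Int) : Decidable (Spec_polynomial_occur arr out) := by unfold Spec_polynomial_occur; infer_instance

-- ===== CLAIM (what is proved, stated in full; the proofs are below) =====
def Claim_equal_polynomial_occur : Prop := ∀ (arr : List Int), Dom_polynomial_occur arr → Spec_polynomial_occur arr (polynomial_occur arr)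

-- ===== LEMMAS AND PROOFS =====

-- the qualification predicate both programs apply to a frequency
def pvOk (c : Int) : Bool := pvIsPerfectSquareB c || pvIsPowerOfTwoB c

-- A's qualifying list is the ordered dedup of arr filtered by pvOk of the count
theorem pvA_char (arr : List Int) :
    polynomial_occur arr =
      match PySem.List.min?
          ((PySem.List.dedup arr).filter (fun v => pvOk ((arr.count v : Int)))) (fun x => x) with
      | some m => m
      | none => -1 := by
  show (match PySem.List.min?
      ((PySem.Dict.counter arr).items.foldl
        (fun acc p => if pvIsPerfectSquareA p.2 || pvIsPowerOfTwoA p.2 then acc ++ [p.1] else acc) [])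
      (fun x => x) with
    | some m => m
    | none => -1) = _
  rw [PySem.Dict.items_counter,
    PySem.List.foldl_append_if (p := fun p => pvIsPerfectSquareA p.2 || pvIsPowerOfTwoA p.2) (f := Prod.fst)]
  simp [List.filter_map, Function.comp_def, PySem.List.dedup_eq_ofList, pvOk,
    pvIsPerfectSquareA, pvIsPowerOfTwoA, pvIsPerfectSquareB, pvIsPowerOfTwoB]

-- discarding an absent element is the identity
theorem pv_discard_not_mem {s : List Int} {x : Int} (h : x ∉ s) :
    PySem.Set.discard s x = s := by
  unfold PySem.Set.discard
  apply List.filter_eq_self.mpr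
  intro y hy; simp; rintro rfl; exact h hy

theorem pv_ofList_replicate_append (n : Nat) (x : Int) (t : List Int) (hx : x ∉ t) :
    PySem.Set.ofList (List.replicate (n + 1) x ++ t) = x :: PySem.Set.ofList t := by
  induction n with
  | zero =>
    rw [List.replicate_one, List.singleton_append, PySem.Set.ofList_cons,
      pv_discard_not_mem (by simp [PySem.Set.mem_ofList, hx])]
  | succ m ih =>
    rw [List.replicate_succ, List.cons_append, PySem.Set.ofList_cons, ih]
    rw [show PySem.Set.discard (x :: PySem.Set.ofList t) x = PySem.Set.discard (PySem.Set.ofList t) x by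
      simp [PySem.Set.discard]]
    rw [pv_discard_not_mem (by simp [PySem.Set.mem_ofList, hx])]

-- scanning a completed run of x of length c + m followed by a block without x
theorem pv_scan_run (m : Nat) (x : Int) (c : Int) (hc : 0 < c) (t : List Int)
    (ht : x ∉ t) :
    pvScanB x c (List.replicate m x ++ t) =
      if pvOk (c + m) then x else pvScanB 0 0 t := by
  induction m generalizing c with
  | zero =>
    simp only [List.replicate_zero, List.nil_append, Nat.cast_zero, add_zero]
    cases t with
    | nil => simp [pvScanB, hc, pvOk]
    | cons w r =>
      have hwx : w ≠ x := fun h => ht (h ▸ List.mem_cons_self)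
      simp [pvScanB, hc, hwx, pvOk]
  | succ k ih =>
    rw [List.replicate_succ, List.cons_append]
    rw [show pvScanB x c (x :: (List.replicate k x ++ t))
        = pvScanB x (c + 1) (List.replicate k x ++ t) by simp [pvScanB, hc]]
    rw [ih (c + 1) (by omega)]
    have h : c + 1 + (k : Int) = c + ((k + 1 : Nat) : Int) := by push_cast; ring
    rw [h]

-- the ordered dedup of a list is a sublist of it
theorem pv_ofList_sublist (s : List Int) : (PySem.Set.ofList s).Sublist s := by
  induction s with
  | nil => simp [PySem.Set.ofList]
  | cons x xs ih =>
    rw [PySem.Set.ofList_cons]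
    exact List.Sublist.cons₂ x ((List.filter_sublist (l := PySem.Set.ofList xs)).trans ih)

-- the scan over a sorted list = head of the qualifying part of its ordered dedup
theorem pv_scan_sorted : ∀ (N : Nat) (s : List Int), s.length ≤ N →
    s.Pairwise (· ≤ ·) →
    pvScanB 0 0 s =
      match ((PySem.Set.ofList s).filter (fun v => pvOk ((s.count v : Int)))).head? with
      | some m => m
      | none => -1 := by
  intro N
  induction N with
  | zero =>
    intro s hl _
    rw [List.length_eq_zero_iff.mp (Nat.le_zero.mp hl)]
    rfl
  | succ N ih =>
    intro s hl hp
    cases s with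
    | nil => rfl
    | cons x s' =>
      set u := s'.takeWhile (fun y => y == x) with hu_def
      set t := s'.dropWhile (fun y => y == x) with ht_def
      have hsplit : u ++ t = s' := List.takeWhile_append_dropWhile
      have hu : u = List.replicate u.length x :=
        List.eq_replicate_length.mpr (fun b hb => by
          have := List.mem_takeWhile_imp hb; simpa using this)
      have hxle : ∀ y ∈ s', x ≤ y := (List.pairwise_cons.mp hp).1
      have hpair' : s'.Pairwise (· ≤ ·) := (List.pairwise_cons.mp hp).2
      have htp : t.Pairwise (· ≤ ·) := List.Pairwise.sublist (List.dropWhile_sublist _) hpair'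
      have hxt : x ∉ t := by
        cases htc : t with
        | nil => simp
        | cons h r =>
          have hh : (h == x) = false := by
            have := List.head?_dropWhile_not (fun y => y == x) s'
            rw [← ht_def, htc] at this; simpa using this
          have hhx : x < h := by
            have hmem : h ∈ s' := (List.dropWhile_sublist _).mem (htc ▸ List.mem_cons_self)
            have := hxle h hmem
            rcases lt_or_eq_of_le this with h1 | h1
            · exact h1
            · exact absurd h1.symm (by simpa using hh)
          intro hmem
          rcases List.mem_cons.mp hmem with rfl | hmem
          · simp at hh
          · have : h ≤ x := (List.pairwise_cons.mp (htc ▸ htp)).1 x hmem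
            omega
      have hs_eq : x :: s' = List.replicate (u.length + 1) x ++ t := by
        rw [List.replicate_succ, List.cons_append, ← hu, hsplit]
      have hcount_x : (x :: s').count x = u.length + 1 := by
        rw [hs_eq, List.count_append, List.count_replicate,
          List.count_eq_zero.mpr hxt]
        simp
      have hlhs : pvScanB 0 0 (x :: s') = if pvOk (1 + (u.length : Int)) then x else pvScanB 0 0 t := by
        rw [show pvScanB 0 0 (x :: s') = pvScanB x 1 s' by simp [pvScanB]]
        rw [← hsplit, hu, pv_scan_run u.length x 1 (by omega) t hxt, List.length_replicate]
      have hofl : PySem.Set.ofList (x :: s') = x :: PySem.Set.ofList t := by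
        rw [hs_eq]; exact pv_ofList_replicate_append _ _ _ hxt
      rw [hlhs, hofl, List.filter_cons]
      have hok_eq : pvOk (((x :: s').count x : Int)) = pvOk (1 + (u.length : Int)) := by
        rw [hcount_x]; congr 1; push_cast; ring
      rw [hok_eq]
      by_cases hq : pvOk (1 + (u.length : Int)) = true
      · simp [hq]
      · simp only [hq, Bool.false_eq_true, if_false]
        have hfc : (PySem.Set.ofList t).filter (fun v => pvOk (((x :: s').count v : Int)))
            = (PySem.Set.ofList t).filter (fun v => pvOk ((t.count v : Int))) := by
          apply List.filter_congr
          intro v hv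
          have hvt : v ∈ t := (PySem.Set.mem_ofList _ _).mp hv
          have hvx : v ≠ x := fun h => hxt (h ▸ hvt)
          congr 2
          rw [hs_eq, List.count_append, List.count_replicate, if_neg (by simpa using fun h => hvx h.symm)]
          simp
        rw [hfc]
        have hlt : t.length ≤ N := by
          have h1 : t.length ≤ s'.length := (List.dropWhile_sublist _).length_le
          have h2 : s'.length + 1 ≤ N + 1 := by simpa using hl
          omega
        exact ih t hlt htp

-- the first element of the sorted qualifying list is the minimum of A's qualifying list
theorem pv_final (arr : List Int) :
    (match PySem.List.min?
        ((PySem.List.dedup arr).filter (fun v => pvOk ((arr.count v : Int)))) (fun x => x) with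
      | some m => m
      | none => -1)
    = pvScanB 0 0 (PySem.List.sorted arr (fun x => x) false) := by
  set s := PySem.List.sorted arr (fun x => x) false with hs_def
  have hp : s.Pairwise (· ≤ ·) := PySem.List.sorted_pairwise arr (fun x => x)
  rw [pv_scan_sorted s.length s le_rfl hp]
  have hperm : s.Perm arr := PySem.List.sorted_perm arr (fun x => x) false
  set F := (PySem.List.dedup arr).filter (fun v => pvOk ((arr.count v : Int))) with hF
  set F' := (PySem.Set.ofList s).filter (fun v => pvOk ((s.count v : Int))) with hF'
  have hmem : ∀ v, v ∈ F ↔ v ∈ F' := by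
    intro v
    rw [hF, hF', List.mem_filter, List.mem_filter, PySem.List.dedup_eq_ofList,
      PySem.Set.mem_ofList, PySem.Set.mem_ofList, hperm.count_eq v, hperm.mem_iff]
  have hlt : F'.Pairwise (· < ·) := by
    have h1 : (PySem.Set.ofList s).Pairwise (· ≤ ·) :=
      List.Pairwise.sublist (pv_ofList_sublist s) hp
    have h2 : (PySem.Set.ofList s).Pairwise (· ≠ ·) := PySem.Set.nodup_ofList s
    have h3 : (PySem.Set.ofList s).Pairwise (· < ·) := by
      have := h1.and h2
      exact this.imp (fun h => lt_of_le_of_ne h.1 h.2)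
    exact List.Pairwise.sublist List.filter_sublist h3
  cases hhd : F'.head? with
  | none =>
    have hF'nil : F' = [] := List.head?_eq_none_iff.mp hhd
    have hFnil : F = [] := by
      apply List.eq_nil_iff_forall_not_mem.mpr
      intro v hv
      exact (List.eq_nil_iff_forall_not_mem.mp hF'nil) v ((hmem v).mp hv)
    rw [hFnil]
    rfl
  | some m =>
    obtain ⟨r, hr⟩ := List.head?_eq_some_iff.mp hhd
    have hmF' : m ∈ F' := hr ▸ List.mem_cons_self
    have hmin' : ∀ y ∈ F', m ≤ y := by
      intro y hy
      rcases List.mem_cons.mp (hr ▸ hy) with rfl | hy'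
      · exact le_refl y
      · exact le_of_lt ((List.pairwise_cons.mp (hr ▸ hlt)).1 y hy')
    have hFne : F ≠ [] := fun h => by
      rw [h] at hmem; exact (by simpa using (hmem m).mpr hmF')
    obtain ⟨m0, hm0⟩ : ∃ m0, PySem.List.min? F (fun x => x) = some m0 := by
      cases hmm : PySem.List.min? F (fun x => x) with
      | none => exact absurd ((PySem.List.min?_eq_none_iff F _).mp hmm) hFne
      | some z => exact ⟨z, rfl⟩
    have hm0F : m0 ∈ F := PySem.List.min?_mem hm0
    have hm0min : ∀ y ∈ F, m0 ≤ y := PySem.List.min?_isMin hm0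
    have heq : m0 = m :=
      le_antisymm (hm0min m ((hmem m).mpr hmF')) (hmin' m0 ((hmem m0).mp hm0F))
    rw [hm0, heq]

-- ===== VERDICT (by name: the statement is the Claim_ definition above) =====
theorem polynomial_occur_spec : Claim_equal_polynomial_occur := by
  intro arr _
  show polynomial_occur arr = polynomial_occur_alt arr
  rw [pvA_char, pv_final]
  rfl
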